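-- pv_equiv track=rewrite | github.com/LarisaOvchinnikova/python_codewars | Word to initial number.py | convert
-- ===== SOURCE A (Python) =====
-- def convert(st):
--     st = st.lower()
--     if st == '': return 0
--     dct = {st[0]: 1}
--     j = 0
--     for i in range(1, len(st)):
--         if st[i] not in dct:
--             dct[st[i]] = j
--             if j == 0:
--                 j+=2
--             else:
--                 j+=1
--     return int("".join([str(dct[el]) for el in st]))
-- ===== SOURCE B (Python) =====
-- def convert(st):
--     st = st.lower()
--     if not st:
--         return 0
--
--     def digit(c):
--         k = len(set(st[:st.index(c)]))
--         if k == 0: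
--             return 1
--         if k == 1:
--             return 0
--         return k
--
--     return int("".join(str(digit(c)) for c in st))
-- ===== Notes on version B (the rewrite author's own statement) =====
-- stated objective: alternative
-- what changed: B drops A's shared dict/counter table entirely: each character's digit is computed independently as a closed form of the number of distinct characters strictly before its first occurrence (len(set(st[:st.index(c)]))), trading A's one-pass table build for independent per-character prefix scans.
import Mathlib
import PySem

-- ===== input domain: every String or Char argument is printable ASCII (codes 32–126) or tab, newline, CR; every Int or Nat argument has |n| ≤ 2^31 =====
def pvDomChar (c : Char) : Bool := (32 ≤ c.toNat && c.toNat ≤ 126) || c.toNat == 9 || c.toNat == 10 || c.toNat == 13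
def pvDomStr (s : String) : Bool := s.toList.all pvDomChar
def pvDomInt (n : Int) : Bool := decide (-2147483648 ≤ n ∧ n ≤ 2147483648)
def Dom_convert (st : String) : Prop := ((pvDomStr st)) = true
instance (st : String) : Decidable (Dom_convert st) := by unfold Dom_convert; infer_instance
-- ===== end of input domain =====

-- B replaces A's one-pass dict-with-counter table by independent per-character digits:
-- each digit is a closed form of the number of distinct characters before the character's
-- first occurrence; same result, no table, no speed claim (B is quadratic).

-- ===== PORT A =====
-- one loop step of A: state (dct, j), current character c
def convertStepA (s : PySem.Dict Char Int × Int) (c : Char) : PySem.Dict Char Int × Int :=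
  if s.1.contains c = false then
    (s.1.insert c s.2, if s.2 = 0 then s.2 + 2 else s.2 + 1)
  else s

def convert (st : String) : Int :=
  let l := PySem.Chars.lower st.toList          -- st = st.lower()
  match l with
  | [] => 0                                     -- if st == '': return 0
  | c0 :: _ =>
    -- dct = {st[0]: 1}; j = 0; for i in range(1, len(st)): …
    let s := (PySem.List.pyRange 1 (l.length : Int) 1).foldl
      (fun s i => convertStepA s (PySem.List.pyGetD l i ' '))
      (PySem.Dict.insert PySem.Dict.empty c0 (1 : Int), (0 : Int))
    -- int("".join([str(dct[el]) for el in st])); dct[el] never misses (every char was inserted)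
    -- and the joined digit string is never a ValueError, so the getD defaults are unreachable
    (PySem.Int.ofChars?
      (PySem.Chars.join [] (l.map (fun el => PySem.Int.toChars ((s.1.get? el).getD 0))))).getD 0

-- ===== PORT B =====
-- digit(c): k = len(set(st[:st.index(c)])); 1 if k == 0 else 0 if k == 1 else k
-- c always occurs in l, so st.index never raises and the getD default is unreachable
def convertDigitB (l : List Char) (c : Char) : Int :=
  let k := (PySem.Set.ofList
    (PySem.List.slice l none (some (((PySem.List.index? l c).getD 0 : Nat) : Int)))).length
  if k = 0 then 1 else if k = 1 then 0 else (k : Int)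

def convert_alt (st : String) : Int :=
  let l := PySem.Chars.lower st.toList          -- st = st.lower()
  if l = [] then 0
  else
    -- int("".join(str(digit(c)) for c in st)); the joined digit string always parses,
    -- so the outer getD default is unreachable
    (PySem.Int.ofChars?
      (PySem.Chars.join [] (l.map (fun c => PySem.Int.toChars (convertDigitB l c))))).getD 0

-- ===== PRECONDITION & SPEC =====
def Spec_convert (st : String) (out : Int) : Prop := out = convert_alt st
instance (st : String) (out : Int) : Decidable (Spec_convert st out) := by unfold Spec_convert; infer_instance

-- ===== CLAIM (what is proved, stated in full; the proofs are below) =====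
def Claim_equal_convert : Prop := ∀ (st : String), Dom_convert st → Spec_convert st (convert st)

-- ===== LEMMAS AND PROOFS =====

-- the digit A's table assigns to the k-th distinct character
def convertRuleB (k : Int) : Int := if k = 0 then 1 else if k = 1 then 0 else k

-- A's table, characterised: for the distinct list d, position k holds convertRuleB k
def bdict (d : List Char) : PySem.Dict Char Int :=
  (PySem.List.enumerate d 0).foldl (fun acc p => PySem.Dict.insert acc p.2 (convertRuleB p.1)) PySem.Dict.empty

-- A's j as a function of the number of distinct characters seen so far
def jval (n : Int) : Int := if n = 1 then 0 else n

theorem keys_bdict (d : List Char) : (bdict d).keys = PySem.Set.ofList d := by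
  unfold bdict
  rw [PySem.Dict.keys_foldl_insert_key (key := fun p : Int × Char => p.2)]
  simp [PySem.List.map_snd_enumerate, PySem.Dict.keys_empty]
  rfl

theorem bdict_append (d : List Char) (x : Char) :
    bdict (d ++ [x]) = (bdict d).insert x (convertRuleB (d.length : Int)) := by
  unfold bdict
  rw [PySem.List.enumerate_append, List.foldl_append]
  simp

-- the loop invariant: folding A's step over the remaining characters yields the table of
-- the distinct characters seen so far, with j = jval (#distinct)
theorem loop_invariant (c0 : Char) (rest : List Char) :
    rest.foldl convertStepA (PySem.Dict.insert PySem.Dict.empty c0 (1 : Int), (0 : Int))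
      = (bdict (PySem.Set.ofList (c0 :: rest)), jval ((PySem.Set.ofList (c0 :: rest)).length : Int)) := by
  induction rest using List.reverseRecOn with
  | nil =>
      simp [bdict, jval, PySem.List.enumerate, PySem.Set.ofList, PySem.Set.add,
        PySem.Set.empty, PySem.Set.contains, convertRuleB]
  | append_singleton rest x ih =>
      have hlist : c0 :: (rest ++ [x]) = (c0 :: rest) ++ [x] := by simp
      rw [List.foldl_append, ih, List.foldl_cons, List.foldl_nil, hlist,
        PySem.Set.ofList_append_singleton]
      set S := PySem.Set.ofList (c0 :: rest) with hS
      have hnd : S.Nodup := PySem.Set.nodup_ofList _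
      have hlen : 0 < S.length :=
        List.length_pos_of_mem ((PySem.Set.mem_ofList _ c0).mpr List.mem_cons_self)
      have hkeys : (bdict S).keys = S := by
        rw [keys_bdict, PySem.Set.ofList_eq_self_of_nodup _ hnd]
      by_cases hmem : x ∈ S
      · have hc : (bdict S).contains x = true := by
          rw [PySem.Dict.contains_iff_mem_keys, hkeys]; exact hmem
        rw [PySem.Set.add_of_mem hmem]
        simp [convertStepA, hc]
      · have hc : (bdict S).contains x = false := by
          rw [Bool.eq_false_iff]
          intro h
          exact hmem (hkeys ▸ (PySem.Dict.contains_iff_mem_keys _ _).mp h)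
        rw [PySem.Set.add_of_not_mem hmem]
        simp only [convertStepA, hc, bdict_append, jval,
          List.length_append, List.length_singleton]
        have h1 : (1 : Int) ≤ (S.length : Int) := by exact_mod_cast hlen
        push_cast
        have hne : S ≠ [] := List.ne_nil_of_length_pos hlen
        rcases eq_or_lt_of_le h1 with h | h
        · simp [convertRuleB, ← h]
        · have h1' : (S.length : Int) ≠ 1 := by omega
          have h2 : (S.length : Int) + 1 ≠ 1 := by omega
          simp [convertRuleB, hne, h1', h2]

-- looking A's table up: the value of c is convertRuleB of c's position among the distinct chars
theorem get?_bdict (d : List Char) (c : Char) (hnd : d.Nodup) (hc : c ∈ d) :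
    (bdict d).get? c = some (convertRuleB (d.idxOf c : Int)) := by
  induction d using List.reverseRecOn with
  | nil => cases hc
  | append_singleton d x ih =>
      rw [bdict_append]
      rcases List.mem_append.mp hc with hmem | hx
      · have hne : c ≠ x := by
          rintro rfl
          exact (List.disjoint_of_nodup_append hnd) hmem (by simp)
        rw [PySem.Dict.get?_insert_of_ne _ _ hne,
          ih (hnd.sublist (List.sublist_append_left _ _)) hmem,
          List.idxOf_append_of_mem hmem]
      · have hcx : c = x := List.mem_singleton.mp hx
        subst hcx
        have hnotmem : c ∉ d := fun h =>
          (List.disjoint_of_nodup_append hnd) h (by simp)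
        rw [PySem.Dict.get?_insert_self, List.idxOf_append_of_notMem hnotmem]
        simp

-- the least-index property of idxOf, as B's prefix slice sees it
theorem pv_not_mem_take_idxOf (c : Char) (l : List Char) : c ∉ l.take (l.idxOf c) := by
  induction l with
  | nil => simp
  | cons a t ih =>
      by_cases h : a = c
      · subst h; simp [List.idxOf_cons_self]
      · rw [List.idxOf_cons_ne _ h]
        intro hm
        rcases List.mem_cons.mp (by simpa using hm) with rfl | hm'
        · exact h rfl
        · exact ih hm'

-- l split at the first occurrence of c
theorem pv_split (l : List Char) (c : Char) (hc : c ∈ l) :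
    l = l.take (l.idxOf c) ++ c :: l.drop (l.idxOf c + 1) := by
  have hk : l.idxOf c < l.length := List.idxOf_lt_length_of_mem hc
  conv_lhs => rw [← List.take_append_drop (l.idxOf c) l]
  rw [List.drop_eq_getElem_cons hk, List.getElem_idxOf]

-- B's rank: the distinct characters before c's first occurrence, counted, give c's
-- position in the distinct list
theorem rank_eq (l : List Char) (c : Char) (hc : c ∈ l) :
    (PySem.Set.ofList (l.take (l.idxOf c))).length = (PySem.Set.ofList l).idxOf c := by
  have hnp : c ∉ l.take (l.idxOf c) := pv_not_mem_take_idxOf c l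
  have hnpS : c ∉ PySem.Set.ofList (l.take (l.idxOf c)) := fun h =>
    hnp ((PySem.Set.mem_ofList _ _).mp h)
  conv_rhs => rw [pv_split l c hc]
  rw [show l.take (l.idxOf c) ++ c :: l.drop (l.idxOf c + 1)
        = (l.take (l.idxOf c) ++ [c]) ++ l.drop (l.idxOf c + 1) by simp,
    PySem.Set.ofList_append, PySem.Set.ofList_append_singleton,
    PySem.Set.add_of_not_mem hnpS, PySem.Set.update_eq_append_filter]
  rw [List.idxOf_append_of_mem (by simp), List.idxOf_append_of_notMem hnpS]
  simp

-- per character, A's table lookup equals B's closed form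
theorem digit_eq (l : List Char) (c : Char) (hc : c ∈ l) :
    ((bdict (PySem.Set.ofList l)).get? c).getD 0 = convertDigitB l c := by
  have hmem : c ∈ PySem.Set.ofList l := (PySem.Set.mem_ofList _ _).mpr hc
  rw [get?_bdict _ _ (PySem.Set.nodup_ofList _) hmem, Option.getD_some]
  unfold convertDigitB
  have hk : l.idxOf c < l.length := List.idxOf_lt_length_of_mem hc
  have hidx : PySem.List.index? l c = some (l.idxOf c) := by
    rw [PySem.List.index?_eq_some_iff]
    exact ⟨l.take (l.idxOf c), l.drop (l.idxOf c + 1), pv_split l c hc,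
      by rw [List.length_take]; omega, pv_not_mem_take_idxOf c l⟩
  rw [hidx]
  simp only [Option.getD_some]
  rw [PySem.List.slice_to_natCast, rank_eq l c hc]
  unfold convertRuleB
  split_ifs <;> omega

theorem convert_eq (st : String) : convert st = convert_alt st := by
  unfold convert convert_alt
  cases hl : PySem.Chars.lower st.toList with
  | nil => simp
  | cons c0 rest =>
      simp only [if_neg (by simp : (c0 :: rest : List Char) ≠ [])]
      have hdrop :
          (PySem.List.pyRange 1 ((c0 :: rest).length : Int) 1).foldl
            (fun s i => convertStepA s (PySem.List.pyGetD (c0 :: rest) i ' '))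
            (PySem.Dict.insert PySem.Dict.empty c0 (1 : Int), (0 : Int))
          = ((c0 :: rest).drop 1).foldl convertStepA
            (PySem.Dict.insert PySem.Dict.empty c0 (1 : Int), (0 : Int)) :=
        PySem.List.foldl_pyRange_pyGetD' (c0 :: rest) ' ' convertStepA _ (by norm_num)
      rw [hdrop]
      simp only [List.drop_one, List.tail_cons]
      rw [loop_invariant]
      have hmap : (c0 :: rest).map
            (fun el => PySem.Int.toChars (((bdict (PySem.Set.ofList (c0 :: rest))).get? el).getD 0))
          = (c0 :: rest).map (fun c => PySem.Int.toChars (convertDigitB (c0 :: rest) c)) :=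
        List.map_congr_left (fun el hel => by rw [digit_eq _ _ hel])
      rw [hmap]

-- ===== VERDICT (by name: the statement is the Claim_ definition above) =====
theorem convert_spec : Claim_equal_convert := by
  intro st _
  unfold Spec_convert
  exact convert_eq st
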